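-- pv_equiv track=rewrite | github.com/teyter/bioinfo | rosalind/lib/minmax.py | bagmax3
-- ===== SOURCE A (Python) =====
-- def bagmax3(tli):
--     ret = []
--     currentMax = 0
--     for i in range(len(tli)):
--         index = tli[i][0]
--         score = tli[i][1]
--         item = tli[i][2]
--         allt = tli[i] # debug, sja nr og item
--         if score > currentMax:
--             currentMax = score
--             ret.clear()
--             ret.append(allt)
--         elif score == currentMax:
--             ret.append(allt)
--     return ret
-- ===== SOURCE B (Python) =====
-- def bagmax3(tli):
--     m = max((t[1] for t in tli), default=0)
--     m = max(m, 0)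
--     return [t for t in tli if t[1] == m]
-- ===== Notes on version B (the rewrite author's own statement) =====
-- stated objective: simpler
-- what changed: Replaces the running-max-with-reset accumulator loop by a two-pass compute-the-maximum-then-filter decomposition (the max is floored at 0, matching A's 0 baseline).
import Mathlib
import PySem

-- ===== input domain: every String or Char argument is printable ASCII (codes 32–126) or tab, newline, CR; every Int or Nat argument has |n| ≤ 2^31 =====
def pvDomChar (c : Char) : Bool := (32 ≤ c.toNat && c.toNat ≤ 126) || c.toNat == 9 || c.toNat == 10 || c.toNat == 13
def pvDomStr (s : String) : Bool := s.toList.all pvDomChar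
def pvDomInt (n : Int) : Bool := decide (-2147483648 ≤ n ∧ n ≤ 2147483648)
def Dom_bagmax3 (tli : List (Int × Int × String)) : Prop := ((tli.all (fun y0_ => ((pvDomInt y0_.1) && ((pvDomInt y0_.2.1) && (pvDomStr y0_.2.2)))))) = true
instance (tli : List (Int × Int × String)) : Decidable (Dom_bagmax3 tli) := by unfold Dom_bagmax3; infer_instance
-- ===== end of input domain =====

-- B replaces A's running-max-with-reset accumulator loop by a simpler two-pass
-- "compute the maximum (floored at 0, A's baseline), then filter" decomposition.

-- ===== PORT A =====
-- A iterates once, keeping (ret, currentMax); a strictly larger score clears ret.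
def bagmax3 (tli : List (Int × Int × String)) : List (Int × Int × String) :=
  (tli.foldl
    (fun (st : List (Int × Int × String) × Int) allt =>
      let score := allt.2.1
      if score > st.2 then ([allt], score)
      else if score == st.2 then (st.1 ++ [allt], st.2)
      else st)
    ([], 0)).1

-- ===== PORT B =====
-- B: m = max of the scores (default 0), floored at 0; then filter rows with that score.
def bagmax3_alt (tli : List (Int × Int × String)) : List (Int × Int × String) :=
  let m := ((tli.map (fun t => t.2.1)).max?).getD 0
  let m := max m 0
  tli.filter (fun t => t.2.1 == m)

-- ===== PRECONDITION & SPEC =====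
def Spec_bagmax3 (tli : List (Int × Int × String)) (out : List (Int × Int × String)) : Prop := out = bagmax3_alt tli
instance (tli : List (Int × Int × String)) (out : List (Int × Int × String)) : Decidable (Spec_bagmax3 tli out) := by unfold Spec_bagmax3; infer_instance

-- ===== CLAIM (what is proved, stated in full; the proofs are below) =====
def Claim_equal_bagmax3 : Prop := ∀ (tli : List (Int × Int × String)), Dom_bagmax3 tli → Spec_bagmax3 tli (bagmax3 tli)

-- ===== LEMMAS AND PROOFS =====

-- the running maximum of the scores, seeded with c
def pvMx (l : List (Int × Int × String)) (c : Int) : Int :=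
  l.foldl (fun m t => max m t.2.1) c

theorem pvMx_le (l : List (Int × Int × String)) (c : Int) : c ≤ pvMx l c := by
  induction l generalizing c with
  | nil => simp [pvMx]
  | cons x xs ih =>
      have h := ih (max c x.2.1)
      exact le_trans (le_max_left _ _) h

-- the loop invariant characterising A's fold
theorem bagmax3_loop (l : List (Int × Int × String))
    (ret : List (Int × Int × String)) (c : Int) :
    (l.foldl
      (fun (st : List (Int × Int × String) × Int) allt =>
        let score := allt.2.1
        if score > st.2 then ([allt], score)
        else if score == st.2 then (st.1 ++ [allt], st.2)
        else st)
      (ret, c)).1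
    = (if pvMx l c = c then ret else []) ++ l.filter (fun t => t.2.1 == pvMx l c) := by
  induction l generalizing ret c with
  | nil => simp [pvMx]
  | cons x xs ih =>
      simp only [List.foldl_cons, List.filter_cons]
      by_cases h1 : x.2.1 > c
      · have hm : pvMx (x :: xs) c = pvMx xs x.2.1 := by
          simp [pvMx, max_eq_right (le_of_lt h1)]
        rw [hm]
        have hlt : c < pvMx xs x.2.1 := lt_of_lt_of_le h1 (pvMx_le xs x.2.1)
        simp only [h1, if_pos]
        rw [ih]
        by_cases h2 : pvMx xs x.2.1 = x.2.1
        · simp [h2]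
          exact fun e => absurd e (ne_of_gt h1)
        · have : ¬ (x.2.1 == pvMx xs x.2.1) = true := by
            simp; exact fun e => h2 e.symm
          simp [h2, ne_of_gt hlt, this]
      · have hle : x.2.1 ≤ c := le_of_not_gt h1
        have hm : pvMx (x :: xs) c = pvMx xs c := by
          simp [pvMx, max_eq_left hle]
        rw [hm]
        by_cases h2 : x.2.1 = c
        · simp only [h2]
          simp only [beq_self_eq_true, if_pos]
          rw [ih]
          by_cases h3 : pvMx xs c = c
          · simp [h3]
          · have : ¬ (c == pvMx xs c) = true := by
              simp; exact fun e => h3 e.symm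
            simp [h3, this]
        · have hlt : x.2.1 < c := lt_of_le_of_ne hle h2
          have hne : ¬ (x.2.1 == c) = true := by simp [h2]
          simp only [h1, hne, if_false]
          rw [ih]
          have : ¬ (x.2.1 == pvMx xs c) = true := by
            simp
            exact ne_of_lt (lt_of_lt_of_le hlt (pvMx_le xs c))
          simp [this]

-- B's floored maximum equals the loop's running maximum seeded with 0
theorem pvMx_foldl_max (l : List Int) (a c : Int) :
    l.foldl max (max c a) = max c (l.foldl max a) := by
  induction l generalizing a with
  | nil => rfl
  | cons x xs ih => simp only [List.foldl_cons, max_assoc, ih]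

theorem pvElim_max (l : List Int) (a : Int) :
    l.max?.elim a (max a) = l.foldl max a := by
  induction l generalizing a with
  | nil => rfl
  | cons y ys ih => simp [ih, pvMx_foldl_max]

theorem pvMx_eq_alt (l : List (Int × Int × String)) :
    pvMx l 0 = max (((l.map (fun t => t.2.1)).max?).getD 0) 0 := by
  cases l with
  | nil => simp [pvMx]
  | cons x xs =>
      have hmax? : ((x :: xs).map (fun t => t.2.1)).max?
          = some ((xs.map (fun t => t.2.1)).foldl max x.2.1) := by
        simp [pvElim_max]
      rw [hmax?]
      have hfold : pvMx (x :: xs) 0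
          = (xs.map (fun t => t.2.1)).foldl max (max 0 x.2.1) := by
        simp [pvMx, List.foldl_map]
      rw [hfold, pvMx_foldl_max]
      simp [max_comm]

-- ===== VERDICT (by name: the statement is the Claim_ definition above) =====
theorem bagmax3_spec : Claim_equal_bagmax3 := by
  intro tli _
  show bagmax3 tli = bagmax3_alt tli
  unfold bagmax3 bagmax3_alt
  show _ = List.filter (fun t => t.2.1 == max (((tli.map (fun t => t.2.1)).max?).getD 0) 0) tli
  rw [bagmax3_loop, ← pvMx_eq_alt]
  have h0 : (0 : Int) ≤ pvMx tli 0 := pvMx_le tli 0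
  by_cases h : pvMx tli 0 = 0 <;> simp [h]
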